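-- pv_equiv track=rewrite | github.com/nikeetan/LeetCode-DSA-Python | Binary_Search/Application.py | rfgrowth
-- ===== SOURCE A (Python) =====
-- def rfgrowth(array:list[int],element:int,low:int,high:int):
--     # Left order growth
--     l=[]
--     while low<=high:
--         mid = low+(high-low)//2
--         if array[mid]==element:
--             high=mid-1
--         elif array[mid]<element:
--             low=mid+1
--         else:
--             high=mid-1
--     l.append((low))
--     low = 0
--     high = len(array)-1
--     while low<=high:
--         mid = low+(high-low)//2
--         if array[mid]==element:
--             low=mid+1
--         elif array[mid]<element:
--             low=mid+1
--         else:
--             high=mid-1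
--     l.append((high))
--     return l
-- ===== SOURCE B (Python) =====
-- def rfgrowth(array, element, low, high):
--     # One generic halving routine instead of two written-out loops: it returns the
--     # first position where pred stops holding along the binary-search path; the
--     # second loop of the original always ends with low == high + 1, so its final
--     # `high` is just first_beyond(<= element) - 1.
--     def first_beyond(pred, lo, hi):
--         if lo > hi:
--             return lo
--         mid = lo + (hi - lo) // 2
--         if pred(array[mid]):
--             return first_beyond(pred, mid + 1, hi)
--         return first_beyond(pred, lo, mid - 1)
--
--     left = first_beyond(lambda v: v < element, low, high)
--     right = first_beyond(lambda v: v <= element, 0, len(array) - 1) - 1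
--     return [left, right]
-- ===== Notes on version B (the rewrite author's own statement) =====
-- stated objective: simpler
-- what changed: Folds A's two hand-written binary-search loops (with their three-way ==/</else triage) into one generic recursive halving helper first_beyond(pred): left = first_beyond(v < element) and right = first_beyond(v <= element) - 1, using the invariant that A's second loop always exits with low == high + 1.
-- outside the precondition, e.g. on rfgrowth([1, 2, 3], 0, 0, 5): A returns [0, -1], B returns [0, -1]; on rfgrowth([1, 2, 3], 10, 0, 5): A raises IndexError, B raises IndexError
import Mathlib
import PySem

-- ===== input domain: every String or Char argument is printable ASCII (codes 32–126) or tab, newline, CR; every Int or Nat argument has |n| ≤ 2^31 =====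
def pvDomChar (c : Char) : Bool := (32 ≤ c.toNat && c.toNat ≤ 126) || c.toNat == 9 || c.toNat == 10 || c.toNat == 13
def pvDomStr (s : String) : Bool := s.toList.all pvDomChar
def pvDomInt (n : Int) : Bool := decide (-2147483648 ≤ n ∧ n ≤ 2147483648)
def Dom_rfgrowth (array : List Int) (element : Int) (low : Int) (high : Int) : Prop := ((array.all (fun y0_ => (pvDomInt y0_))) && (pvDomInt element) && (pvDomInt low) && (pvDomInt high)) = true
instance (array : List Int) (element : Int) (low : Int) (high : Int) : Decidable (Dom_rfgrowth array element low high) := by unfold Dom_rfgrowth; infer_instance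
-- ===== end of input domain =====

-- B computes both bounds with one generic recursive halving helper instead of A's two written-out binary-search loops; return values proved equal on every admitted input.


-- shared helper: array[i] (total form of Python's array[i]; Pre_ keeps every probed index inside [-len, len), where Python returns a value)
def pvElem (array : List Int) (i : Int) : Int := (PySem.List.pyGet? array i).getD 0

-- ===== PORT A =====
-- first while loop of A: binary search on the window [low, high], returns the final `low`.
-- The Nat argument is pure fuel (the window shrinks every iteration, so (high - low + 1).toNat
-- steps always suffice); it only makes the recursion structural.
def rfgrowthL1Go (array : List Int) (element : Int) : Nat → Int → Int → Int
  | 0, low, _ => low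
  | fuel + 1, low, high =>
    if low ≤ high then
      let mid := low + PySem.Int.floordiv (high - low) 2
      if pvElem array mid == element then rfgrowthL1Go array element fuel low (mid - 1)
      else if pvElem array mid < element then rfgrowthL1Go array element fuel (mid + 1) high
      else rfgrowthL1Go array element fuel low (mid - 1)
    else low

-- second while loop of A: binary search on [0, len - 1], returns the final `high`
def rfgrowthL2Go (array : List Int) (element : Int) : Nat → Int → Int → Int
  | 0, _, high => high
  | fuel + 1, low, high =>
    if low ≤ high then
      let mid := low + PySem.Int.floordiv (high - low) 2
      if pvElem array mid == element then rfgrowthL2Go array element fuel (mid + 1) high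
      else if pvElem array mid < element then rfgrowthL2Go array element fuel (mid + 1) high
      else rfgrowthL2Go array element fuel low (mid - 1)
    else high

def rfgrowth (array : List Int) (element : Int) (low : Int) (high : Int) : List Int :=
  [rfgrowthL1Go array element (high - low + 1).toNat low high,
   rfgrowthL2Go array element (((array.length : Int) - 1) - 0 + 1).toNat 0 ((array.length : Int) - 1)]

-- ===== PORT B =====
-- B's single generic helper: first position where pred stops holding along the halving path
-- (same fuel discipline as above)
def rfFirstBeyond (array : List Int) (pred : Int → Bool) : Nat → Int → Int → Int
  | 0, lo, _ => lo
  | fuel + 1, lo, hi =>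
    if lo ≤ hi then
      let mid := lo + PySem.Int.floordiv (hi - lo) 2
      if pred (pvElem array mid) then rfFirstBeyond array pred fuel (mid + 1) hi
      else rfFirstBeyond array pred fuel lo (mid - 1)
    else lo

def rfgrowth_alt (array : List Int) (element : Int) (low : Int) (high : Int) : List Int :=
  [rfFirstBeyond array (fun v => v < element) (high - low + 1).toNat low high,
   rfFirstBeyond array (fun v => v ≤ element)
     (((array.length : Int) - 1) - 0 + 1).toNat 0 ((array.length : Int) - 1) - 1]

-- ===== PRECONDITION & SPEC =====
-- Pre_ admits every empty window and every window inside [-len, len) (there no index probe can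
-- raise); it excludes non-empty windows reaching outside [-len, len), where A may raise
-- IndexError depending on the probe path (B probes the same indices and behaves identically).
def Pre_rfgrowth (array : List Int) (element : Int) (low : Int) (high : Int) : Prop :=
  low ≤ high → (-(array.length : Int) ≤ low ∧ high < (array.length : Int))
instance (array : List Int) (element : Int) (low : Int) (high : Int) : Decidable (Pre_rfgrowth array element low high) := by unfold Pre_rfgrowth; infer_instance

def pvWitness_rfgrowth : List Int × Int × Int × Int := ([1, 2, 2, 5], 2, 0, 3)

def Spec_rfgrowth (array : List Int) (element : Int) (low : Int) (high : Int) (out : List Int) : Prop := out = rfgrowth_alt array element low high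
instance (array : List Int) (element : Int) (low : Int) (high : Int) (out : List Int) : Decidable (Spec_rfgrowth array element low high out) := by unfold Spec_rfgrowth; infer_instance

-- ===== CLAIM (what is proved, stated in full; the proofs are below) =====
def Claim_equal_rfgrowth : Prop := ∀ (array : List Int) (element : Int) (low : Int) (high : Int), Dom_rfgrowth array element low high → Pre_rfgrowth array element low high → Spec_rfgrowth array element low high (rfgrowth array element low high)

-- ===== LEMMAS AND PROOFS =====

-- A's first loop takes mid+1 exactly when array[mid] < element, so it IS first_beyond (· < element)
theorem loop1_eq_firstBeyond (array : List Int) (element : Int) :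
    ∀ fuel low high, rfgrowthL1Go array element fuel low high =
      rfFirstBeyond array (fun v => v < element) fuel low high := by
  intro fuel
  induction fuel with
  | zero => intro low high; rfl
  | succ f ih =>
    intro low high
    by_cases hlh : low ≤ high
    · set mid := low + PySem.Int.floordiv (high - low) 2 with hmid
      simp only [rfgrowthL1Go, rfFirstBeyond, if_pos hlh, ← hmid]
      by_cases he : pvElem array mid == element
      · have hlt : ¬ (pvElem array mid < element) := by have := eq_of_beq he; omega
        rw [if_pos he, if_neg (by simpa using hlt)]
        exact ih low (mid - 1)
      · rw [if_neg he]
        by_cases hlt : pvElem array mid < element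
        · rw [if_pos hlt, if_pos (by simpa using hlt)]
          exact ih (mid + 1) high
        · rw [if_neg hlt, if_neg (by simpa using hlt)]
          exact ih low (mid - 1)
    · simp [rfgrowthL1Go, rfFirstBeyond, hlh]

-- A's second loop takes mid+1 exactly when array[mid] ≤ element, and it always exits with
-- low = high + 1, so its final `high` is first_beyond (· ≤ element) - 1
theorem loop2_eq_firstBeyond (array : List Int) (element : Int) :
    ∀ fuel low high, (high - low + 1).toNat ≤ fuel → low ≤ high + 1 →
      rfgrowthL2Go array element fuel low high =
      rfFirstBeyond array (fun v => v ≤ element) fuel low high - 1 := by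
  intro fuel
  induction fuel with
  | zero =>
    intro low high h1 h2
    show high = low - 1
    omega
  | succ f ih =>
    intro low high h1 h2
    by_cases hlh : low ≤ high
    · have hd : PySem.Int.floordiv (high - low) 2 = (high - low) / 2 :=
        PySem.Int.floordiv_eq_ediv_of_pos (by omega)
      set mid := low + PySem.Int.floordiv (high - low) 2 with hmid
      have hmlo : low ≤ mid := by rw [hmid, hd]; omega
      have hmhi : mid ≤ high := by rw [hmid, hd]; omega
      simp only [rfgrowthL2Go, rfFirstBeyond, if_pos hlh, ← hmid]
      by_cases he : pvElem array mid == element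
      · have hle : pvElem array mid ≤ element := by have := eq_of_beq he; omega
        rw [if_pos he, if_pos (by simpa using hle)]
        exact ih (mid + 1) high (by omega) (by omega)
      · rw [if_neg he]
        by_cases hlt : pvElem array mid < element
        · rw [if_pos hlt, if_pos (by simpa using (by omega : pvElem array mid ≤ element))]
          exact ih (mid + 1) high (by omega) (by omega)
        · have hne : ¬ pvElem array mid = element := by simpa using he
          rw [if_neg hlt, if_neg (by simpa using (by omega : ¬ pvElem array mid ≤ element))]
          exact ih low (mid - 1) (by omega) (by omega)
    · have hhl : high = low - 1 := by omega
      simp [rfgrowthL2Go, rfFirstBeyond, hhl]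

-- ===== VERDICT (by name: the statement is the Claim_ definition above) =====
theorem rfgrowth_spec : Claim_equal_rfgrowth := by
  intro array element low high _hdom _hpre
  unfold Spec_rfgrowth rfgrowth rfgrowth_alt
  rw [loop1_eq_firstBeyond array element]
  rw [loop2_eq_firstBeyond array element _ 0 ((array.length : Int) - 1) (by omega) (by omega)]
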